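-- pv_equiv track=rewrite | github.com/sirapop3/COMBINI_Mig | preprocess/processXMLtoJSON.py | find_token_indices
-- ===== SOURCE A (Python) =====
-- import string
--
-- def find_token_indices(entity_text, full_text_tokens):
--     """Find the start and end indices of an entity in tokenized text, handling mismatches."""
--     entity_tokens = entity_text.split()
--     entity_tokens = [token.strip(string.punctuation).lower() for token in entity_tokens]
--     full_text_tokens = [token.strip(string.punctuation).lower() for token in full_text_tokens]
--
--     for i in range(len(full_text_tokens) - len(entity_tokens) + 1):
--         if full_text_tokens[i:i + len(entity_tokens)] == entity_tokens:
--             return i, i + len(entity_tokens) - 1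
--
--     return None, None  # Return None if not found
-- ===== SOURCE B (Python) =====
-- import string
--
-- def find_token_indices(entity_text, full_text_tokens):
--     """Single left-to-right pass (NFA simulation): maintain the set of active
--     partial-match lengths instead of re-comparing a window at every start."""
--     pattern = [t.strip(string.punctuation).lower() for t in entity_text.split()]
--     tokens = [t.strip(string.punctuation).lower() for t in full_text_tokens]
--     m = len(pattern)
--     if m == 0:
--         return 0, -1
--     active = []
--     for j, tok in enumerate(tokens):
--         active = [k + 1 for k in active + [0] if pattern[k] == tok]
--         if m in active:
--             return j - m + 1, j
--     return None, None
-- ===== Notes on version B (the rewrite author's own statement) =====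
-- stated objective: alternative
-- what changed: B replaces A's per-start window/slice comparison with a single left-to-right pass that maintains the set of active partial-match lengths (an NFA simulation of the pattern), reporting the first position where a full-length match becomes active; no slicing or window re-comparison occurs.
import Mathlib
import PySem

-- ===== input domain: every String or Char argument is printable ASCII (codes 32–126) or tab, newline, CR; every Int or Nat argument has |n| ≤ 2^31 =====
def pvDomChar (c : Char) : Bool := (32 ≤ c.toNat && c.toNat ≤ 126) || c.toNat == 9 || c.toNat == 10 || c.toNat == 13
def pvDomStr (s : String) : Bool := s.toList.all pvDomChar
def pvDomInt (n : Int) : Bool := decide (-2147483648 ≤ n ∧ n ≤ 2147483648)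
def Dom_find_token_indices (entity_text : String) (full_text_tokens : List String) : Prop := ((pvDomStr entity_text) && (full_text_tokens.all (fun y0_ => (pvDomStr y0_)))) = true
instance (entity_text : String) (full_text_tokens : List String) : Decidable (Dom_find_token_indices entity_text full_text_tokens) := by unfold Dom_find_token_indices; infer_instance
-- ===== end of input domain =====

-- B replaces A's window-by-window slice comparison with a single pass that maintains the
-- set of active partial-match lengths (NFA simulation); same result, proved equal everywhere.

-- string.punctuation
def pvPunct : String := "!\"#$%&'()*+,-./:;<=>?@[\\]^_`{|}~"

-- token.strip(string.punctuation).lower()  (shared normalisation expression of both Pythons)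
def pvNorm (t : String) : String := PySem.Str.lower (PySem.Str.stripChars t pvPunct)

-- ===== PORT A =====
-- 'for i in range(...): if full_text_tokens[i:i+len(entity_tokens)] == entity_tokens: return i, …'
def pvScan (pat toks : List String) : List Int → List (Option Int)
  | [] => [none, none]
  | i :: rest =>
    if PySem.List.slice toks (some i) (some (i + (pat.length : Int))) = pat then
      [some i, some (i + (pat.length : Int) - 1)]
    else pvScan pat toks rest

def find_token_indices (entity_text : String) (full_text_tokens : List String) : List (Option Int) :=
  let entity_tokens := (PySem.Str.split₀ entity_text).map pvNorm
  let fts := full_text_tokens.map pvNorm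
  pvScan entity_tokens fts
    (PySem.List.pyRange 0 ((fts.length : Int) - (entity_tokens.length : Int) + 1) 1)

-- ===== PORT B =====
-- 'active = [k + 1 for k in active + [0] if pattern[k] == tok]'
def pvStep (pat : List String) (active : List Int) (tok : String) : List Int :=
  (active ++ [0]).filterMap (fun k => if PySem.List.pyGetD pat k "" = tok then some (k + 1) else none)

-- 'for j, tok in enumerate(tokens): … ; if m in active: return j - m + 1, j' / fall through
def pvLoop (pat : List String) (m : Int) (active : List Int) (j : Int) : List String → List (Option Int)
  | [] => [none, none]
  | tok :: rest =>
    let active' := pvStep pat active tok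
    if m ∈ active' then [some (j - m + 1), some j]
    else pvLoop pat m active' (j + 1) rest

def find_token_indices_alt (entity_text : String) (full_text_tokens : List String) : List (Option Int) :=
  let pattern := (PySem.Str.split₀ entity_text).map pvNorm
  let tokens := full_text_tokens.map pvNorm
  let m : Int := (pattern.length : Int)
  if m = 0 then [some 0, some (-1)]
  else pvLoop pattern m [] 0 tokens

-- ===== PRECONDITION & SPEC =====
def Spec_find_token_indices (entity_text : String) (full_text_tokens : List String) (out : List (Option Int)) : Prop := out = find_token_indices_alt entity_text full_text_tokens
instance (entity_text : String) (full_text_tokens : List String) (out : List (Option Int)) : Decidable (Spec_find_token_indices entity_text full_text_tokens out) := by unfold Spec_find_token_indices; infer_instance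

-- ===== CLAIM (what is proved, stated in full; the proofs are below) =====
def Claim_equal_find_token_indices : Prop := ∀ (entity_text : String) (full_text_tokens : List String), Dom_find_token_indices entity_text full_text_tokens → Spec_find_token_indices entity_text full_text_tokens (find_token_indices entity_text full_text_tokens)

-- ===== LEMMAS AND PROOFS =====

-- 'partial match of length k ends after the first j tokens'
def pvW (pat tks : List String) (j k : Nat) : Prop := (tks.drop (j - k)).take k = pat.take k

-- loop invariant: active holds exactly the nonzero partial-match lengths at position j
def pvInv (pat tks : List String) (j : Nat) (active : List Int) : Prop :=
  ∀ k : Int, k ∈ active ↔ ∃ kn : Nat, k = (kn : Int) ∧ 1 ≤ kn ∧ kn ≤ pat.length ∧ kn ≤ j ∧ pvW pat tks j kn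

-- no full match ends within the first j tokens
def pvNoM (pat tks : List String) (j : Nat) : Prop :=
  ∀ i : Nat, i + pat.length ≤ j → (tks.drop i).take pat.length ≠ pat

-- the scan returns the first index of the list passing the window test
theorem pvScan_eq_find (pat tks : List String) (l : List Int) :
    pvScan pat tks l =
      match l.find? (fun i => PySem.List.slice tks (some i) (some (i + (pat.length : Int))) == pat) with
      | some i => [some i, some (i + (pat.length : Int) - 1)]
      | none => [none, none] := by
  induction l with
  | nil => rfl
  | cons a l ih =>
    rw [List.find?_cons]
    by_cases h : PySem.List.slice tks (some a) (some (a + (pat.length : Int))) = pat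
    · simp [pvScan, h]
    · have hb : (PySem.List.slice tks (some a) (some (a + (pat.length : Int))) == pat) = false := by
        simp [h]
      simp [pvScan, h, hb, ih]

-- A's answer for an empty pattern
theorem pvScan_core_nil (tks : List String) :
    pvScan [] tks (PySem.List.pyRange 0 ((tks.length : Int) - (([] : List String).length : Int) + 1) 1) =
      [some 0, some (-1)] := by
  rw [PySem.List.pyRange_one_cons (by simp only [List.length_nil, Nat.cast_zero]; omega)]
  simp [pvScan, PySem.List.slice_zero_start, PySem.List.slice_to]

-- the window at a nonnegative start is a drop-take
theorem pvSlice_window (tks : List String) (m : Nat) (i : Int) (h0 : 0 ≤ i) :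
    PySem.List.slice tks (some i) (some (i + (m : Int))) = (tks.drop i.toNat).take m := by
  rw [PySem.List.slice_toNat tks h0 (by omega)]
  congr 1
  omega

-- extending a partial match by one token
theorem pvW_succ (pat tks : List String) (j k : Nat) (hkj : k ≤ j) (hj : j < tks.length)
    (hk : k < pat.length) :
    pvW pat tks (j + 1) (k + 1) ↔ (pvW pat tks j k ∧ tks[j] = pat[k]) := by
  unfold pvW
  have hjk : j + 1 - (k + 1) = j - k := by omega
  rw [hjk]
  have hlen : k < (tks.drop (j - k)).length := by
    rw [List.length_drop]; omega
  have h1 : (tks.drop (j - k)).take (k + 1)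
      = (tks.drop (j - k)).take k ++ [(tks.drop (j - k))[k]] := by
    rw [List.take_add_one, List.getElem?_eq_getElem hlen]; rfl
  have hidx : (tks.drop (j - k))[k] = tks[j] := by
    rw [List.getElem_drop]
    congr 1
    omega
  have h2 : pat.take (k + 1) = pat.take k ++ [pat[k]] := by
    rw [List.take_add_one, List.getElem?_eq_getElem hk]; rfl
  rw [h1, h2, hidx]
  constructor
  · intro h
    have := List.append_inj' h rfl
    exact ⟨this.1, by simpa using this.2⟩
  · rintro ⟨h3, h4⟩
    rw [h3, h4]

-- a full-length partial match is a real match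
theorem pvW_full (pat tks : List String) (j : Nat) :
    pvW pat tks j pat.length ↔ (tks.drop (j - pat.length)).take pat.length = pat := by
  unfold pvW
  rw [List.take_length]

-- membership in the comprehension step
theorem pvStep_mem (pat : List String) (active : List Int) (tok : String) (k' : Int) :
    k' ∈ pvStep pat active tok ↔
      ∃ k : Int, (k ∈ active ∨ k = 0) ∧ PySem.List.pyGetD pat k "" = tok ∧ k' = k + 1 := by
  simp only [pvStep, List.mem_filterMap, List.mem_append, List.mem_singleton]
  constructor
  · rintro ⟨k, hk, hf⟩
    by_cases h : PySem.List.pyGetD pat k "" = tok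
    · rw [if_pos h] at hf
      exact ⟨k, hk, h, by simpa using hf.symm⟩
    · rw [if_neg h] at hf
      exact absurd hf (by simp)
  · rintro ⟨k, hk, h, rfl⟩
    exact ⟨k, hk, by rw [if_pos h]⟩

-- one step preserves (and characterises) the invariant, given no match so far
theorem pvStep_inv (pat tks : List String) (j : Nat) (active : List Int)
    (hne : pat ≠ []) (hj : j < tks.length)
    (hInv : pvInv pat tks j active) (hNoM : pvNoM pat tks j) :
    pvInv pat tks (j + 1) (pvStep pat active tks[j]) := by
  intro k'
  rw [pvStep_mem]
  constructor
  · rintro ⟨k, hk, hget, rfl⟩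
    rcases hk with hk | rfl
    · rcases (hInv k).1 hk with ⟨kn, rfl, h1, h2, h3, hW⟩
      have hlt : kn < pat.length := by
        rcases Nat.lt_or_ge kn pat.length with h | h
        · exact h
        · exfalso
          have hkm : kn = pat.length := by omega
          subst hkm
          exact hNoM (j - pat.length) (by omega) ((pvW_full pat tks j).1 hW)
      refine ⟨kn + 1, by push_cast; ring, by omega, by omega, by omega, ?_⟩
      rw [pvW_succ pat tks j kn h3 hj hlt]
      refine ⟨hW, ?_⟩
      rw [PySem.List.pyGetD_natCast, List.getD_eq_getElem _ _ hlt] at hget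
      exact hget.symm
    · -- k = 0: start a new partial match of length 1
      have hpos : 0 < pat.length := List.length_pos_of_ne_nil hne
      have h0 : PySem.List.pyGetD pat (0 : Int) "" = pat[0] := by
        rw [show (0 : Int) = ((0 : Nat) : Int) by norm_num, PySem.List.pyGetD_natCast,
          List.getD_eq_getElem _ _ hpos]
      refine ⟨1, by norm_num, le_refl _, hpos, by omega, ?_⟩
      rw [show (1 : Nat) = 0 + 1 by rfl, pvW_succ pat tks j 0 (by omega) hj hpos]
      refine ⟨by unfold pvW; simp, ?_⟩
      rw [h0] at hget
      exact hget.symm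
  · rintro ⟨kn, rfl, h1, h2, h3, hW⟩
    obtain ⟨kp, rfl⟩ : ∃ kp, kn = kp + 1 := ⟨kn - 1, by omega⟩
    have hlt : kp < pat.length := by omega
    have hkpj : kp ≤ j := by omega
    rw [pvW_succ pat tks j kp hkpj hj hlt] at hW
    refine ⟨(kp : Int), ?_, ?_, by push_cast; ring⟩
    · rcases Nat.eq_zero_or_pos kp with rfl | hpos
      · right; rfl
      · left
        exact (hInv (kp : Int)).2 ⟨kp, rfl, hpos, by omega, hkpj, hW.1⟩
    · rw [PySem.List.pyGetD_natCast, List.getD_eq_getElem _ _ hlt]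
      exact hW.2.symm
-- the loop equals the naive scan whenever no match ended in the prefix already consumed
theorem pvLoop_eq (pat tks : List String) (hne : pat ≠ []) :
    ∀ (rest : List String) (j : Nat) (active : List Int),
      rest = tks.drop j → j ≤ tks.length →
      pvInv pat tks j active → pvNoM pat tks j →
      pvLoop pat (pat.length : Int) active (j : Int) rest =
        pvScan pat tks (PySem.List.pyRange 0 ((tks.length : Int) - (pat.length : Int) + 1) 1) := by
  intro rest
  induction rest with
  | nil =>
    intro j active hrest hjle hInv hNoM
    have hjn : tks.length ≤ j := by
      have := congrArg List.length hrest
      simp only [List.length_nil, List.length_drop] at this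
      omega
    rw [pvScan_eq_find]
    have hfind : (PySem.List.pyRange 0 ((tks.length : Int) - (pat.length : Int) + 1) 1).find?
        (fun i => PySem.List.slice tks (some i) (some (i + (pat.length : Int))) == pat) = none := by
      rw [List.find?_eq_none]
      intro i hi
      have hmem := (PySem.List.mem_pyRange_one).1 hi
      rw [pvSlice_window tks pat.length i hmem.1]
      simp only [beq_iff_eq]
      apply hNoM i.toNat
      omega
    rw [hfind]
    rfl
  | cons tok rest ih =>
    intro j active hrest hjle hInv hNoM
    have hj : j < tks.length := by
      by_contra h
      rw [List.drop_eq_nil_of_le (by omega)] at hrest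
      exact (List.cons_ne_nil _ _) hrest
    have h2 : tok :: rest = tks[j] :: tks.drop (j + 1) :=
      hrest.trans (List.drop_eq_getElem_cons hj)
    injection h2 with htok hrest'
    subst htok
    have hInv' := pvStep_inv pat tks j active hne hj hInv hNoM
    simp only [pvLoop]
    by_cases hm : ((pat.length : Nat) : Int) ∈ pvStep pat active tks[j]
    · -- first full match ends at position j
      rcases (hInv' _).1 hm with ⟨kn, hcast, hk1, hk2, hk3, hW⟩
      have hknm : kn = pat.length := by exact_mod_cast hcast.symm
      subst hknm
      have hmle : pat.length ≤ j + 1 := hk3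
      rw [if_pos hm, pvScan_eq_find]
      have hfind : (PySem.List.pyRange 0 ((tks.length : Int) - (pat.length : Int) + 1) 1).find?
          (fun i => PySem.List.slice tks (some i) (some (i + (pat.length : Int))) == pat)
          = some ((j + 1 - pat.length : Nat) : Int) := by
        rw [PySem.List.pyRange_one_append 0 ((j + 1 - pat.length : Nat) : Int)
              ((tks.length : Int) - (pat.length : Int) + 1) (by omega) (by omega),
            List.find?_append]
        have hnone : (PySem.List.pyRange 0 ((j + 1 - pat.length : Nat) : Int) 1).find?
            (fun i => PySem.List.slice tks (some i) (some (i + (pat.length : Int))) == pat) = none := by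
          rw [List.find?_eq_none]
          intro i hi
          have hmem := (PySem.List.mem_pyRange_one).1 hi
          rw [pvSlice_window tks pat.length i hmem.1]
          simp only [beq_iff_eq]
          apply hNoM i.toNat
          omega
        rw [hnone, Option.none_or,
            PySem.List.pyRange_one_cons (by omega), List.find?_cons]
        have hP : PySem.List.slice tks (some ((j + 1 - pat.length : Nat) : Int))
            (some (((j + 1 - pat.length : Nat) : Int) + (pat.length : Int))) = pat := by
          rw [pvSlice_window tks pat.length _ (by omega)]
          have : ((j + 1 - pat.length : Nat) : Int).toNat = j + 1 - pat.length := by omega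
          rw [this]
          have := (pvW_full pat tks (j + 1)).1 hW
          simpa using this
        simp [hP]
      rw [hfind]
      have e1 : (j : Int) - (pat.length : Int) + 1 = ((j + 1 - pat.length : Nat) : Int) := by omega
      have e2 : (j : Int) = ((j + 1 - pat.length : Nat) : Int) + (pat.length : Int) - 1 := by omega
      rw [e1, e2]
    · -- no match yet: continue
      rw [if_neg hm]
      have hNoM' : pvNoM pat tks (j + 1) := by
        intro i hi
        rcases Nat.lt_or_ge (i + pat.length) (j + 1) with h | h
        · exact hNoM i (by omega)
        · have hieq : i = j + 1 - pat.length := by omega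
          intro heq
          apply hm
          refine (hInv' _).2 ⟨pat.length, rfl, List.length_pos_of_ne_nil hne, le_refl _, by omega, ?_⟩
          rw [pvW_full]
          rw [hieq] at heq
          exact heq
      have hcast : (j : Int) + 1 = ((j + 1 : Nat) : Int) := by push_cast; ring
      rw [hcast]
      exact ih (j + 1) _ hrest' (by omega) hInv' hNoM'

-- the two ports agree
theorem pvPorts_eq (entity_text : String) (full_text_tokens : List String) :
    find_token_indices entity_text full_text_tokens
      = find_token_indices_alt entity_text full_text_tokens := by
  unfold find_token_indices find_token_indices_alt
  cases hp : (PySem.Str.split₀ entity_text).map pvNorm with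
  | nil =>
    rw [if_pos (by simp)]
    simpa using pvScan_core_nil (full_text_tokens.map pvNorm)
  | cons first rest =>
    rw [if_neg (by simp only [List.length_cons]; push_cast; omega)]
    have h := pvLoop_eq (first :: rest) (full_text_tokens.map pvNorm) (by simp)
      (full_text_tokens.map pvNorm) 0 [] rfl (by omega)
      (by
        intro k
        simp only [List.not_mem_nil, false_iff]
        rintro ⟨kn, _, h1, _, h3, _⟩
        omega)
      (by
        intro i hi
        exact absurd hi (by simp only [List.length_cons]; omega))
    simpa using h.symm

-- ===== VERDICT (by name: the statement is the Claim_ definition above) =====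
theorem find_token_indices_spec : Claim_equal_find_token_indices := by
  intro entity_text full_text_tokens _
  unfold Spec_find_token_indices
  exact pvPorts_eq entity_text full_text_tokens
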